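-- pv_equiv track=rewrite | github.com/marconobile/ml-simplefold | scripts/export_npz_xyz_to_pdb.py | split_pdb_template
-- ===== SOURCE A (Python) =====
-- from typing import List, Sequence, Tuple
--
-- ATOM_RECORDS = ("ATOM", "HETATM")
--
-- def split_pdb_template(
--     pdb_lines: Sequence[str],
-- ) -> Tuple[List[str], List[str], List[str]]:
--     atom_indices = [
--         i for i, line in enumerate(pdb_lines) if line.startswith(ATOM_RECORDS)
--     ]
--     if not atom_indices:
--         raise ValueError("Template PDB contains no ATOM/HETATM records.")
--
--     first_atom = atom_indices[0]
--     last_atom = atom_indices[-1]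
--     header = list(pdb_lines[:first_atom])
--     atom_lines = list(pdb_lines[first_atom : last_atom + 1])
--     footer = list(pdb_lines[last_atom + 1 :])
--     return header, atom_lines, footer
-- ===== SOURCE B (Python) =====
-- from typing import List, Sequence, Tuple
--
-- ATOM_RECORDS = ("ATOM", "HETATM")
--
-- def split_pdb_template(
--     pdb_lines: Sequence[str],
-- ) -> Tuple[List[str], List[str], List[str]]:
--     # Single-pass state machine: no indices, no slicing.  Lines before the first
--     # atom record accumulate in header; once in the atom section, non-atom lines
--     # go to a pending tail that is flushed into atom_lines whenever another atom
--     # record appears, so the final pending tail is exactly the footer.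
--     header: List[str] = []
--     atom_lines: List[str] = []
--     tail: List[str] = []
--     for line in pdb_lines:
--         if line.startswith(ATOM_RECORDS):
--             atom_lines.extend(tail)
--             atom_lines.append(line)
--             tail = []
--         elif atom_lines:
--             tail.append(line)
--         else:
--             header.append(line)
--     if not atom_lines:
--         raise ValueError("Template PDB contains no ATOM/HETATM records.")
--     return header, atom_lines, tail
-- ===== Notes on version B (the rewrite author's own statement) =====
-- stated objective: alternative
-- what changed: B replaces A's index-gathering pass plus three slices by a single-pass state machine over the lines themselves: lines go to header until the first atom record, then non-atom lines buffer in a pending tail that is flushed into atom_lines at each further atom record, so the leftover tail is the footer; no indices or slicing are used.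
import Mathlib
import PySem

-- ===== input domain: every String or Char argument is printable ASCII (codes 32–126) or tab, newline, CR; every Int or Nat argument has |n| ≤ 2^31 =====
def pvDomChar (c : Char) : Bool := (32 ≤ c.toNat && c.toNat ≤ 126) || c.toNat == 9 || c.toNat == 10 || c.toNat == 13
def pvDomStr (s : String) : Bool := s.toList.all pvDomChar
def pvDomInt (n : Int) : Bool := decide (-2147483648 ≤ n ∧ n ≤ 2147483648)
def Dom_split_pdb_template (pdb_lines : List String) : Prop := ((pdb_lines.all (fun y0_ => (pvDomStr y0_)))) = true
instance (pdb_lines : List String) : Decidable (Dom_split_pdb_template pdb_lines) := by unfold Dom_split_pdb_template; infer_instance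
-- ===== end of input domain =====

-- B replaces A's index list + slicing by a single-pass state machine that routes each
-- line into header / atom_lines / pending-tail buffers; objective: alternative.

-- line.startswith(ATOM_RECORDS): Python startswith with a tuple is the disjunction of the prefixes
def pvIsAtom (line : String) : Bool :=
  PySem.Str.startswith line "ATOM" || PySem.Str.startswith line "HETATM"

-- ===== PORT A =====
-- the list comprehension over enumerate(pdb_lines), carrying the running index i
def pvIdxsFrom (i : Nat) : List String → List Nat
  | [] => []
  | l :: t => if pvIsAtom l then i :: pvIdxsFrom (i + 1) t else pvIdxsFrom (i + 1) t

def split_pdb_template (pdb_lines : List String) : List String × List String × List String :=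
  match pvIdxsFrom 0 pdb_lines with
  | [] => ([], [], [])  -- here Python raises ValueError; excluded by Pre_
  | first_atom :: rest =>
    let last_atom := (first_atom :: rest).getLastD 0  -- atom_indices[-1]; list is nonempty here
    (PySem.List.slice pdb_lines none (some (first_atom : Int)),
     PySem.List.slice pdb_lines (some (first_atom : Int)) (some ((last_atom : Int) + 1)),
     PySem.List.slice pdb_lines (some ((last_atom : Int) + 1)) none)

-- ===== PORT B =====
-- the for-loop: state (header, atom_lines, tail); append = ++ [line], extend = ++
def pvLoop (h a t : List String) : List String → List String × List String × List String
  | [] => (h, a, t)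
  | l :: rest =>
    if pvIsAtom l then pvLoop h (a ++ t ++ [l]) [] rest
    else if a ≠ [] then pvLoop h a (t ++ [l]) rest
    else pvLoop (h ++ [l]) a t rest

def split_pdb_template_alt (pdb_lines : List String) : List String × List String × List String :=
  let r := pvLoop [] [] [] pdb_lines
  if r.2.1 = [] then ([], [], [])  -- here Python raises ValueError; excluded by Pre_
  else r

-- ===== PRECONDITION & SPEC =====
-- Pre_ excludes exactly the inputs with no ATOM/HETATM line, on which A raises ValueError (B does too).
def Pre_split_pdb_template (pdb_lines : List String) : Prop :=
  ∃ line ∈ pdb_lines, pvIsAtom line = true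
instance (pdb_lines : List String) : Decidable (Pre_split_pdb_template pdb_lines) := by
  unfold Pre_split_pdb_template; infer_instance

def pvWitness_split_pdb_template : List String := ["HEADER x", "ATOM  1", "TER"]

def Spec_split_pdb_template (pdb_lines : List String) (out : List String × List String × List String) : Prop := out = split_pdb_template_alt pdb_lines
instance (pdb_lines : List String) (out : List String × List String × List String) : Decidable (Spec_split_pdb_template pdb_lines out) := by unfold Spec_split_pdb_template; infer_instance

-- ===== CLAIM (what is proved, stated in full; the proofs are below) =====
def Claim_equal_split_pdb_template : Prop := ∀ (pdb_lines : List String), Dom_split_pdb_template pdb_lines → Pre_split_pdb_template pdb_lines → Spec_split_pdb_template pdb_lines (split_pdb_template pdb_lines)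

-- ===== LEMMAS AND PROOFS =====

-- the closed shape both ports compute: slices at the first/last atom index
def pvShape (xs : List String) : List String × List String × List String :=
  match pvIdxsFrom 0 xs with
  | [] => (xs, [], [])
  | f :: r =>
      let m := (f :: r).getLastD 0
      (xs.take f, (xs.drop f).take (m + 1 - f), xs.drop (m + 1))

-- one loop step, as a function of the state
def pvStep (s : List String × List String × List String) (l : String) :
    List String × List String × List String :=
  if pvIsAtom l then (s.1, s.2.1 ++ s.2.2 ++ [l], [])
  else if s.2.1 ≠ [] then (s.1, s.2.1, s.2.2 ++ [l])
  else (s.1 ++ [l], s.2.1, s.2.2)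

theorem pvLoop_append (h a t : List String) (xs : List String) (l : String) :
    pvLoop h a t (xs ++ [l]) = pvStep (pvLoop h a t xs) l := by
  induction xs generalizing h a t with
  | nil => simp [pvLoop, pvStep]
  | cons x rest ih =>
      simp only [List.cons_append, pvLoop]
      split_ifs <;> simp [ih]

theorem pvIdxsFrom_append (i : Nat) (xs : List String) (l : String) :
    pvIdxsFrom i (xs ++ [l]) =
      pvIdxsFrom i xs ++ (if pvIsAtom l then [i + xs.length] else []) := by
  induction xs generalizing i with
  | nil => simp [pvIdxsFrom]
  | cons a t ih =>
      simp only [List.cons_append, pvIdxsFrom, ih (i + 1), List.length_cons]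
      split_ifs <;> simp <;> omega

theorem pvIdxsFrom_mem_bound (i : Nat) (xs : List String) :
    ∀ k ∈ pvIdxsFrom i xs, i ≤ k ∧ k < i + xs.length := by
  induction xs generalizing i with
  | nil => simp [pvIdxsFrom]
  | cons a t ih =>
      intro k hk
      simp only [pvIdxsFrom] at hk
      split_ifs at hk with h
      · rcases List.mem_cons.1 hk with rfl | hk
        · simp
        · have := ih (i + 1) k hk; simp only [List.length_cons]; omega
      · have := ih (i + 1) k hk; simp only [List.length_cons]; omega

theorem pvIdxsFrom_eq_nil_iff (i : Nat) (xs : List String) :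
    pvIdxsFrom i xs = [] ↔ ∀ l ∈ xs, pvIsAtom l = false := by
  induction xs generalizing i with
  | nil => simp [pvIdxsFrom]
  | cons a t ih =>
      simp only [pvIdxsFrom]
      split_ifs with h
      · simp [h]
      · simp [ih, h]

theorem pvIdxsFrom_pairwise (i : Nat) (xs : List String) :
    (pvIdxsFrom i xs).Pairwise (· < ·) := by
  induction xs generalizing i with
  | nil => simp [pvIdxsFrom]
  | cons a t ih =>
      simp only [pvIdxsFrom]
      split_ifs with h
      · refine List.Pairwise.cons ?_ (ih (i + 1))
        intro k hk
        exact lt_of_lt_of_le (by omega) (pvIdxsFrom_mem_bound (i + 1) t k hk).1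
      · exact ih (i + 1)

theorem pvLastD_concat (x a : Nat) (l : List Nat) : ((x :: l) ++ [a]).getLastD 0 = a := by
  rw [List.getLastD_eq_getLast?, List.getLast?_concat]; rfl

theorem pvLastD_mem (x : Nat) (l : List Nat) : (x :: l).getLastD 0 ∈ x :: l := by
  rw [List.getLastD_eq_getLast?, List.getLast?_eq_some_getLast (by simp), Option.getD_some]
  exact List.getLast_mem _

-- f = first atom index, m = last atom index: f ≤ m < length
theorem pvBounds (xs : List String) (f : Nat) (r : List Nat)
    (hidx : pvIdxsFrom 0 xs = f :: r) :
    f ≤ (f :: r).getLastD 0 ∧ (f :: r).getLastD 0 < xs.length := by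
  set m := (f :: r).getLastD 0 with hm
  have hmmem : m ∈ f :: r := pvLastD_mem f r
  have hmlt : m < xs.length := by
    have := pvIdxsFrom_mem_bound 0 xs m (by rw [hidx]; exact hmmem)
    omega
  refine ⟨?_, hmlt⟩
  rcases List.mem_cons.1 hmmem with h | hmr
  · omega
  · have hp := pvIdxsFrom_pairwise 0 xs
    rw [hidx] at hp
    exact le_of_lt ((List.pairwise_cons.1 hp).1 m hmr)

theorem pvMid_ne_nil (xs : List String) (f m : Nat) (hfm : f ≤ m) (hmlt : m < xs.length) :
    (xs.drop f).take (m + 1 - f) ≠ [] := by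
  intro hem
  have : ((xs.drop f).take (m + 1 - f)).length = 0 := by rw [hem]; rfl
  simp only [List.length_take, List.length_drop] at this
  omega

-- the invariant: the state machine started empty computes the slice shape
theorem pvLoop_eq_pvShape (xs : List String) : pvLoop [] [] [] xs = pvShape xs := by
  induction xs using List.reverseRecOn with
  | nil => simp [pvLoop, pvShape, pvIdxsFrom]
  | append_singleton ys l ih =>
      rw [pvLoop_append, ih]
      unfold pvShape
      rw [pvIdxsFrom_append]
      cases hidx : pvIdxsFrom 0 ys with
      | nil =>
          by_cases hP : pvIsAtom l
          · simp only [hP, if_true, List.nil_append, Nat.zero_add]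
            dsimp only [pvStep]
            rw [hP, if_pos rfl]
            have h1 : (ys ++ [l]).take ys.length = ys := by
              rw [List.take_append_of_le_length (le_refl _), List.take_length]
            have h2 : (ys ++ [l]).drop ys.length = [l] := by
              rw [List.drop_append_of_le_length (le_refl _), List.drop_length,
                List.nil_append]
            have h3 : (ys ++ [l]).drop (ys.length + 1) = [] :=
              List.drop_eq_nil_of_le (by simp)
            have h4 : ([ys.length] : List Nat).getLastD 0 = ys.length := by simp
            rw [h4, h1, h3, Nat.add_sub_cancel_left, h2]
            simp
          · simp [hP, pvStep]
      | cons f r =>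
          obtain ⟨hfm, hmlt⟩ := pvBounds ys f r hidx
          have hflt : f < ys.length := lt_of_le_of_lt hfm hmlt
          have hanil : List.take ((f :: r).getLastD 0 + 1 - f) (List.drop f ys) ≠ [] :=
            pvMid_ne_nil ys f _ hfm hmlt
          by_cases hP : pvIsAtom l
          · -- new atom record: flush the pending tail; new last index is ys.length
            simp only [hP, if_true, List.cons_append, Nat.zero_add]
            dsimp only [pvStep]
            rw [hP, if_pos rfl]
            have hlast : (f :: (r ++ [ys.length])).getLastD 0 = ys.length := by
              rw [← List.cons_append, pvLastD_concat]
            rw [hlast]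
            have h1 : (ys.drop f).take ((f :: r).getLastD 0 + 1 - f) ++
                ys.drop ((f :: r).getLastD 0 + 1) = ys.drop f := by
              rw [← List.drop_take]
              have hle : f ≤ (ys.take ((f :: r).getLastD 0 + 1)).length := by
                simp only [List.length_take]; omega
              rw [← List.drop_append_of_le_length hle, List.take_append_drop]
            have h2 : (ys ++ [l]).drop f = ys.drop f ++ [l] :=
              List.drop_append_of_le_length (le_of_lt hflt)
            have h3 : (ys.drop f ++ [l]).take (ys.length + 1 - f) = ys.drop f ++ [l] := by
              apply List.take_of_length_le
              simp only [List.length_append, List.length_drop, List.length_cons,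
                List.length_nil]
              omega
            have h4 : (ys ++ [l]).drop (ys.length + 1) = [] :=
              List.drop_eq_nil_of_le (by simp)
            rw [List.take_append_of_le_length (le_of_lt hflt), h2, h3, h4, h1]
          · -- non-atom line in the atom section: it joins the pending tail
            simp only [hP, if_false, Bool.false_eq_true, List.append_nil]
            dsimp only [pvStep]
            have hPf : pvIsAtom l = false := by simpa using hP
            rw [hPf]
            simp only [Bool.false_eq_true, if_false]
            rw [if_pos hanil,
              List.take_append_of_le_length (le_of_lt hflt),
              List.drop_append_of_le_length (le_of_lt hflt),
              List.take_append_of_le_length (by simp only [List.length_drop]; omega),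
              List.drop_append_of_le_length
                (by omega : (f :: r).getLastD 0 + 1 ≤ ys.length)]

-- ===== VERDICT (by name: the statement is the Claim_ definition above) =====
theorem split_pdb_template_spec : Claim_equal_split_pdb_template := by
  intro xs _hdom hpre
  obtain ⟨line, hmem, hP⟩ := hpre
  unfold Spec_split_pdb_template split_pdb_template split_pdb_template_alt
  rw [pvLoop_eq_pvShape]
  unfold pvShape
  cases hidx : pvIdxsFrom 0 xs with
  | nil =>
      exact absurd ((pvIdxsFrom_eq_nil_iff 0 xs).1 hidx line hmem) (by simp [hP])
  | cons f r =>
      obtain ⟨hfm, hmlt⟩ := pvBounds xs f r hidx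
      have hanil := pvMid_ne_nil xs f ((f :: r).getLastD 0) hfm hmlt
      dsimp only
      rw [if_neg (by simpa using hanil)]
      have hcast : (((f :: r).getLastD 0 : Int) + 1) = (((f :: r).getLastD 0 + 1 : Nat) : Int) := by
        push_cast; ring
      rw [PySem.List.slice_to_natCast, hcast, PySem.List.slice_natCast,
        PySem.List.slice_from_natCast]
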